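-- pv_equiv track=rewrite | github.com/michael-borck/feed-forward | app/assessment/handlers/essay.py | _highlight_key_terms
-- ===== SOURCE A (Python) =====
-- def _highlight_key_terms(text: str) -> str:
--     """Highlight key terms in feedback text."""
--     # This is a placeholder - in real implementation, this could add
--     # HTML tags or markdown formatting
--     key_terms = ['thesis', 'evidence', 'structure', 'argument', 'clarity',
--                  'coherence', 'transition', 'conclusion', 'introduction']
--
--     highlighted = text
--     for term in key_terms:
--         # In a real implementation, you might add <strong> tags or **markdown**
--         highlighted = highlighted.replace(term, f"**{term}**")
--         highlighted = highlighted.replace(term.capitalize(), f"**{term.capitalize()}**")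
--
--     return highlighted
-- ===== SOURCE B (Python) =====
-- def _highlight_key_terms(text: str) -> str:
--     """Highlight key terms in feedback text (single left-to-right scan)."""
--     key_terms = ['thesis', 'evidence', 'structure', 'argument', 'clarity',
--                  'coherence', 'transition', 'conclusion', 'introduction']
--     patterns = [p for term in key_terms for p in (term, term.capitalize())]
--     out = []
--     i = 0
--     n = len(text)
--     while i < n:
--         for p in patterns:
--             if text.startswith(p, i):
--                 out.append(f"**{p}**")
--                 i += len(p)
--                 break
--         else:
--             out.append(text[i])
--             i += 1
--     return "".join(out)
-- ===== Notes on version B (the rewrite author's own statement) =====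
-- stated objective: alternative
-- what changed: Replaces A's 18 sequential whole-string str.replace passes by one left-to-right scan that tries the 18 patterns at each position and wraps the first match, emitting one output in a single traversal.
-- outside the precondition, e.g. on _highlight_key_terms('argumenthesis'): A returns 'argumen**thesis**', B returns '**argument**hesis'; on _highlight_key_terms('structurevidence'): A returns 'structur**evidence**', B returns '**structure**vidence'
import Mathlib
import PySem

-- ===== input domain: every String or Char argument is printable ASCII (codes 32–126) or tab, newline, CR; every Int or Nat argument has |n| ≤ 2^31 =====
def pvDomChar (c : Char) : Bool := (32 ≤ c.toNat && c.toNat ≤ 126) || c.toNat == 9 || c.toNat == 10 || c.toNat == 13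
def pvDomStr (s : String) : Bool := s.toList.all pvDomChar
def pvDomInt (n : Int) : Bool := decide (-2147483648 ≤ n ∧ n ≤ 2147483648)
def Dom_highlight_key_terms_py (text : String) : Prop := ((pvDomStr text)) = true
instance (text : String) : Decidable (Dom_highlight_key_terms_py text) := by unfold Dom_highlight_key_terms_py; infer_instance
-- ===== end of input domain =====

-- B replaces A's 18 sequential str.replace passes by one left-to-right scan wrapping the first
-- matching pattern at each position; Pre_ excludes the seven overlap words on which the pass
-- order vs text order of matches could differ.

-- ===== PORT A =====
def pvKeyTerms : List String :=
  ["thesis", "evidence", "structure", "argument", "clarity",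
   "coherence", "transition", "conclusion", "introduction"]

-- hand port of str.capitalize (first char upper, rest lower); exact on ASCII
def pyCapitalize (s : String) : String :=
  match s.toList with
  | [] => ""
  | c :: cs => String.ofList (PySem.Chars.upperChar c :: PySem.Chars.lower cs)

def highlight_key_terms_py (text : String) : String :=
  pvKeyTerms.foldl (fun highlighted term =>
    let h1 := PySem.Str.replace highlighted term ("**" ++ term ++ "**")
    PySem.Str.replace h1 (pyCapitalize term) ("**" ++ pyCapitalize term ++ "**")) text

-- ===== PORT B =====
-- f"**{p}**" as a char list
def wrapP (p : List Char) : List Char := '*' :: '*' :: (p ++ '*' :: '*' :: [])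

-- patterns = [p for term in key_terms for p in (term, term.capitalize())]
def pvPatterns : List (List Char) :=
  pvKeyTerms.flatMap (fun t => [t.toList, (pyCapitalize t).toList])

-- the while loop: at each position try the patterns in order; wrap the first match, else copy the char
def scanGo (pats : List (List Char)) (s : List Char) : List Char :=
  match s with
  | [] => []
  | c :: rest =>
    match pats.find? (fun p => p.isPrefixOf (c :: rest)) with
    | some p => wrapP p ++ scanGo pats (rest.drop (p.length - 1))
    | none => c :: scanGo pats rest
termination_by s.length
decreasing_by
  all_goals simp

def highlight_key_terms_py_alt (text : String) : String :=
  String.ofList (scanGo pvPatterns text.toList)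

-- ===== PRECONDITION & SPEC =====
-- Pre_ excludes texts containing one of the seven overlap words (e.g. "argumenthesis"), on which
-- an earlier-pass term of A starts strictly inside a later-listed term: there A's pass order and
-- any single-pass left-to-right matcher defensibly pick different matches (a first-vs-last-match
-- corner); A still returns a value there, see the cited examples.
def pvConflicts : List String :=
  ["argumenthesis", "Argumenthesis", "structurevidence", "Structurevidence",
   "coherencevidence", "Coherencevidence", "Evidencevidence"]

def Pre_highlight_key_terms_py (text : String) : Prop :=
  ∀ m ∈ pvConflicts, PySem.Str.isIn m text = false

instance (text : String) : Decidable (Pre_highlight_key_terms_py text) := by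
  unfold Pre_highlight_key_terms_py; infer_instance

def pvWitness_highlight_key_terms_py : String := "The thesis needs Evidence and structure."

def Spec_highlight_key_terms_py (text : String) (out : String) : Prop := out = highlight_key_terms_py_alt text
instance (text : String) (out : String) : Decidable (Spec_highlight_key_terms_py text out) := by unfold Spec_highlight_key_terms_py; infer_instance

-- ===== CLAIM (what is proved, stated in full; the proofs are below) =====
def Claim_equal_highlight_key_terms_py : Prop := ∀ (text : String), Dom_highlight_key_terms_py text → Pre_highlight_key_terms_py text → Spec_highlight_key_terms_py text (highlight_key_terms_py text)

-- ===== LEMMAS AND PROOFS =====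

-- clean recursion equal to PySem.Chars.replace for a nonempty pattern
def replP (old new : List Char) : List Char → List Char
  | [] => []
  | c :: t =>
    if old.isPrefixOf (c :: t) then new ++ replP old new (t.drop (old.length - 1))
    else c :: replP old new t
termination_by s => s.length
decreasing_by
  all_goals simp

theorem replP_nil (old new : List Char) : replP old new [] = [] := by
  rw [replP.eq_def]

theorem replP_cons (old new : List Char) (c : Char) (t : List Char) :
    replP old new (c :: t) =
      if old.isPrefixOf (c :: t) then new ++ replP old new (t.drop (old.length - 1))
      else c :: replP old new t := by
  rw [replP.eq_def]

theorem replP_go_spec (old new : List Char) (hold : old ≠ []) :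
    ∀ (fuel : Nat) (l acc : List Char), l.length ≤ fuel →
      PySem.Chars.replace.go old new fuel l acc = acc.reverse ++ replP old new l := by
  intro fuel
  induction fuel with
  | zero =>
    intro l acc hl
    have hl0 : l = [] := List.eq_nil_of_length_eq_zero (Nat.le_zero.mp hl)
    subst hl0
    simp [PySem.Chars.replace.go, replP_nil]
  | succ f ih =>
    intro l acc hl
    obtain ⟨k, hk⟩ : ∃ k, old.length = k + 1 := by
      cases old with
      | nil => exact absurd rfl hold
      | cons a b => exact ⟨b.length, rfl⟩
    cases l with
    | nil => simp [PySem.Chars.replace.go, replP_nil]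
    | cons c t =>
      rw [PySem.Chars.replace.go]
      by_cases hp : old.isPrefixOf (c :: t)
      · have hdrop : List.drop old.length (c :: t) = t.drop k := by
          rw [hk]; rfl
        have hlen : (t.drop k).length ≤ f := by
          have := List.length_drop (l := t) (i := k)
          simp at hl
          omega
        simp only [hp, if_pos, hdrop]
        rw [ih _ _ hlen, replP_cons]
        simp [hp, hk, List.append_assoc]
      · have hlen : t.length ≤ f := by simp at hl; omega
        simp only [hp, if_neg, Bool.false_eq_true, not_false_eq_true]
        rw [ih _ _ hlen, replP_cons]
        simp [hp]

theorem replace_eq_replP (old new s : List Char) (hold : old ≠ []) :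
    PySem.Chars.replace s old new = replP old new s := by
  rw [PySem.Chars.replace]
  have : old.isEmpty = false := by cases old with | nil => exact absurd rfl hold | cons a b => rfl
  rw [this]
  simpa using replP_go_spec old new hold s.length s [] (le_refl _)

-- unfolding lemmas for scanGo
theorem scanGo_nil (pats : List (List Char)) : scanGo pats [] = [] := by
  simp [scanGo]

theorem scanGo_cons (pats : List (List Char)) (c : Char) (rest : List Char) :
    scanGo pats (c :: rest) =
      match pats.find? (fun p => p.isPrefixOf (c :: rest)) with
      | some p => wrapP p ++ scanGo pats (rest.drop (p.length - 1))
      | none => c :: scanGo pats rest := by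
  rw [scanGo.eq_def]

theorem scanGo_empty (s : List Char) : scanGo [] s = s := by
  induction s with
  | nil => exact scanGo_nil []
  | cons c rest ih => rw [scanGo_cons]; simp [ih]

-- prefix of an append is a prefix of the left part or extends it
theorem prefix_append_cases {u a b : List Char} (h : u <+: a ++ b) : u <+: a ∨ a <+: u := by
  induction a generalizing u with
  | nil => exact Or.inr (List.nil_prefix)
  | cons x a' ih =>
    cases u with
    | nil => exact Or.inl List.nil_prefix
    | cons y u' =>
      rw [List.cons_append, List.cons_prefix_cons] at h
      obtain ⟨rfl, h'⟩ := h
      rcases ih h' with h1 | h1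
      · exact Or.inl (List.cons_prefix_cons.mpr ⟨rfl, h1⟩)
      · exact Or.inr (List.cons_prefix_cons.mpr ⟨rfl, h1⟩)

-- a star-free nonempty prefix of scanGo's output is a prefix of its input
theorem starfree_prefix_scan (pats : List (List Char)) :
    ∀ (s q : List Char), q ≠ [] → '*' ∉ q → q <+: scanGo pats s → q <+: s := by
  intro s
  induction s with
  | nil => intro q hq hqs h; rwa [scanGo_nil] at h
  | cons c rest ih =>
    intro q hq hqs h
    rw [scanGo_cons] at h
    cases hf : pats.find? (fun p => p.isPrefixOf (c :: rest)) with
    | some p =>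
      rw [hf] at h
      cases q with
      | nil => exact absurd rfl hq
      | cons y q' =>
        have h2 : y :: q' <+: '*' :: ('*' :: ((p ++ '*' :: '*' :: []) ++ scanGo pats (List.drop (p.length - 1) rest))) := h
        rw [List.cons_prefix_cons] at h2
        exact absurd (h2.1 ▸ List.mem_cons_self) hqs
    | none =>
      rw [hf] at h
      cases q with
      | nil => exact absurd rfl hq
      | cons y q' =>
        have h2 : y :: q' <+: c :: scanGo pats rest := h
        rw [List.cons_prefix_cons] at h2
        obtain ⟨rfl, h'⟩ := h2
        have : q' <+: rest := by
          cases hq' : q' with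
          | nil => exact List.nil_prefix
          | cons z q'' =>
            rw [← hq']
            exact ih q' (by simp [hq']) (fun hz => hqs (List.mem_cons_of_mem _ hz)) h'
        exact List.cons_prefix_cons.mpr ⟨rfl, this⟩

-- replP passes over a segment in which no match starts
theorem replP_append_no_match (old new T : List Char) :
    ∀ (a : List Char), (∀ i < a.length, ¬ old <+: (a.drop i ++ T)) →
      replP old new (a ++ T) = a ++ replP old new T := by
  intro a
  induction a with
  | nil => intro _; simp
  | cons c a' ih =>
    intro h
    have h0 : ¬ old <+: ((c :: a') ++ T) := by simpa using h 0 (by simp)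
    rw [List.cons_append, replP_cons, if_neg (by simpa [List.isPrefixOf_iff_prefix] using h0)]
    rw [ih (fun i hi => by simpa [List.drop_succ_cons] using h (i + 1) (by simp; omega))]
    simp

-- scanGo copies a segment in which no pattern matches
theorem scanGo_copy (pats : List (List Char)) (t : List Char) :
    ∀ (u : List Char), (∀ i < u.length, ∀ p ∈ pats, ¬ p <+: (u.drop i ++ t)) →
      scanGo pats (u ++ t) = u ++ scanGo pats t := by
  intro u
  induction u with
  | nil => intro _; simp
  | cons c u' ih =>
    intro h
    have h0 : ∀ p ∈ pats, ¬ p <+: ((c :: u') ++ t) := by simpa using h 0 (by simp)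
    have hfind : pats.find? (fun p => p.isPrefixOf (c :: (u' ++ t))) = none := by
      rw [List.find?_eq_none]
      intro p hp
      simpa [List.isPrefixOf_iff_prefix] using h0 p hp
    rw [List.cons_append, scanGo_cons, hfind]
    rw [ih (fun i hi p hp => by simpa [List.drop_succ_cons] using h (i + 1) (by simp; omega) p hp)]
    simp

-- a star-free q that is not an infix of p cannot match anywhere inside "**p**"
theorem no_match_in_wrap (q p : List Char) (hq : q ≠ []) (hqs : '*' ∉ q) (h3 : ¬ q <:+: p) :
    ∀ (T : List Char), ∀ i < (wrapP p).length, ¬ q <+: ((wrapP p).drop i ++ T) := by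
  have star_head : ∀ xs : List Char, ¬ q <+: ('*' :: xs) := by
    intro xs hpre
    cases q with
    | nil => exact hq rfl
    | cons y q' =>
      rw [List.cons_prefix_cons] at hpre
      exact hqs (hpre.1 ▸ List.mem_cons_self)
  intro T i hi hpre
  have hlen : (wrapP p).length = p.length + 4 := by simp [wrapP]
  rcases Nat.lt_or_ge i 2 with hc | hc
  · interval_cases i
    · exact star_head _ (by simpa [wrapP] using hpre)
    · exact star_head _ (by simpa [wrapP] using hpre)
  · have hdrop : (wrapP p).drop i = (p ++ '*' :: '*' :: []).drop (i - 2) := by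
      rw [wrapP, show i = (i - 2) + 1 + 1 by omega]
      simp [List.drop_succ_cons]
    rcases Nat.lt_or_ge (i - 2) p.length with hjp | hjp
    · rw [hdrop, List.drop_append_of_le_length (le_of_lt hjp), List.append_assoc] at hpre
      rcases prefix_append_cases hpre with hcase | hcase
      · exact h3 (hcase.isInfix.trans (List.drop_suffix (i - 2) p).isInfix)
      · obtain ⟨q₂, hq2⟩ := hcase
        cases q₂ with
        | nil =>
          rw [List.append_nil] at hq2
          exact h3 (hq2 ▸ (List.drop_suffix (i - 2) p).isInfix)
        | cons z q₂' =>
          rw [← hq2] at hpre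
          have hz := (List.prefix_append_right_inj (p.drop (i - 2))).mp hpre
          have : z = '*' := by
            have := (List.cons_prefix_cons.mp (by simpa using hz)).1
            exact this
          exact hqs (by rw [← hq2, this]; exact List.mem_append_right _ List.mem_cons_self)
    · have hdd : i - 2 - p.length < 2 := by omega
      have hdrop2 : (p ++ '*' :: '*' :: []).drop (i - 2) = ('*' :: '*' :: []).drop (i - 2 - p.length) := by
        rw [show i - 2 = p.length + (i - 2 - p.length) by omega]
        simp [List.drop_append]
      rw [hdrop, hdrop2] at hpre
      rcases Nat.lt_or_ge (i - 2 - p.length) 1 with hd | hd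
      · rw [show i - 2 - p.length = 0 by omega] at hpre
        exact star_head _ hpre
      · rw [show i - 2 - p.length = 1 by omega] at hpre
        exact star_head _ hpre

def NoConf (M : List (List Char)) (s : List Char) : Prop := ∀ m ∈ M, ¬ m <:+: s

theorem noConf_of_infix {M : List (List Char)} {s t : List Char}
    (h : t <:+: s) (hs : NoConf M s) : NoConf M t := by
  intro m hm hmt
  exact hs m hm (hmt.trans h)

-- the pairwise condition on the pattern list: p is an earlier pattern, q a later one
def CondB (M : List (List Char)) (p q : List Char) : Bool :=
  !(decide (q <:+: p)) &&
  (List.range q.length).all (fun i =>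
    decide (i = 0) || !((q.drop i).isPrefixOf p || p.isPrefixOf (q.drop i)) ||
    M.any (fun m => m.isPrefixOf (q.take i ++ p)))

theorem CondB_spec {M : List (List Char)} {p q : List Char} (h : CondB M p q = true) :
    ¬ q <:+: p ∧
    ∀ i < q.length, 0 < i → ((q.drop i <+: p) ∨ (p <+: q.drop i)) →
      ∃ m ∈ M, m <+: (q.take i ++ p) := by
  unfold CondB at h
  simp only [Bool.and_eq_true, Bool.not_eq_true', decide_eq_false_iff_not, List.all_eq_true,
    List.mem_range, Bool.or_eq_true, decide_eq_true_eq, Bool.not_eq_true', Bool.or_eq_false_iff,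
    List.any_eq_true, List.isPrefixOf_iff_prefix] at h
  obtain ⟨h1, h2⟩ := h
  refine ⟨h1, fun i hi hpos hov => ?_⟩
  rcases h2 i hi with (h0 | ⟨hn1, hn2⟩) | ⟨m, hm, hmp⟩
  · omega
  · rw [← List.isPrefixOf_iff_prefix, ← List.isPrefixOf_iff_prefix] at hov
    simp [hn1, hn2] at hov
  · exact ⟨m, hm, hmp⟩

-- the heart: appending one more (later) pattern to the scan is a final replace pass
theorem step_lemma (M : List (List Char)) (Q : List (List Char)) (q : List Char)
    (hq : q ≠ []) (hqs : '*' ∉ q)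
    (hC : ∀ p ∈ Q, CondB M p q = true) :
    ∀ (n : Nat) (s : List Char), s.length ≤ n → NoConf M s →
      replP q (wrapP q) (scanGo Q s) = scanGo (Q ++ [q]) s := by
  intro n
  induction n with
  | zero =>
    intro s hs _
    have : s = [] := List.eq_nil_of_length_eq_zero (Nat.le_zero.mp hs)
    subst this
    simp [scanGo_nil, replP_nil]
  | succ n ih =>
    intro s hs hnc
    cases s with
    | nil => simp [scanGo_nil, replP_nil]
    | cons c rest =>
      cases hf : Q.find? (fun p => p.isPrefixOf (c :: rest)) with
      | some p =>
        have hpQ : p ∈ Q := List.mem_of_find?_eq_some hf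
        have hfq : (Q ++ [q]).find? (fun p => p.isPrefixOf (c :: rest)) = some p := by
          rw [List.find?_append, hf]; rfl
        have h3 : ¬ q <:+: p := (CondB_spec (hC p hpQ)).1
        rw [scanGo_cons, hf, scanGo_cons, hfq]
        rw [replP_append_no_match q (wrapP q) _ (wrapP p)
          (fun i hi => no_match_in_wrap q p hq hqs h3 _ i hi)]
        congr 1
        apply ih
        · have h1 := List.length_drop (l := rest) (i := p.length - 1)
          simp at hs
          omega
        · exact noConf_of_infix
            (((List.drop_suffix (p.length - 1) rest).trans (List.suffix_cons c rest)).isInfix) hnc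
      | none =>
        by_cases hqp : q <+: (c :: rest)
        · obtain ⟨t, ht⟩ := hqp
          have hnc' : NoConf M (q ++ t) := by rw [ht]; exact hnc
          have hcopy : scanGo Q (q ++ t) = q ++ scanGo Q t := by
            apply scanGo_copy
            intro i hi p hp hpre
            rcases Nat.eq_zero_or_pos i with h0 | hpos
            · subst h0
              rw [List.drop_zero, ht] at hpre
              have hh : ¬ p <+: c :: rest := by
                simpa [List.isPrefixOf_iff_prefix] using List.find?_eq_none.mp hf p hp
              exact hh hpre
            · have hov : (q.drop i <+: p) ∨ (p <+: q.drop i) := by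
                rcases prefix_append_cases hpre with hcase | hcase
                · exact Or.inr hcase
                · exact Or.inl hcase
              obtain ⟨m, hm, hmp⟩ := (CondB_spec (hC p hp)).2 i hi hpos hov
              have hstep : q.take i ++ p <+: q ++ t := by
                have h1 : q.take i ++ p <+: q.take i ++ (q.drop i ++ t) :=
                  (List.prefix_append_right_inj _).mpr hpre
                rwa [← List.append_assoc, List.take_append_drop] at h1
              exact hnc m hm (by rw [← ht]; exact (hmp.trans hstep).isInfix)
          cases q with
          | nil => exact absurd rfl hq
          | cons qc qt =>
            have hqet : qc :: (qt ++ t) = c :: rest := ht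
            -- left side
            rw [show ((c :: rest) : List Char) = qc :: (qt ++ t) from hqet.symm]
            have hl : scanGo Q (qc :: (qt ++ t)) = (qc :: qt) ++ scanGo Q t := hcopy
            rw [hl, List.cons_append, replP_cons,
              if_pos (by simp [List.isPrefixOf_iff_prefix])]
            rw [show (qc :: qt).length - 1 = qt.length from by simp, List.drop_left]
            -- right side
            have hfq : (Q ++ [qc :: qt]).find? (fun p => p.isPrefixOf (qc :: (qt ++ t))) = some (qc :: qt) := by
              rw [List.find?_append]
              rw [show Q.find? (fun p => p.isPrefixOf (qc :: (qt ++ t))) = none from by rw [hqet]; exact hf]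
              simp [List.isPrefixOf_iff_prefix]
            rw [scanGo_cons, hfq]
            change _ = wrapP (qc :: qt) ++ scanGo (Q ++ [qc :: qt]) (List.drop ((qc :: qt).length - 1) (qt ++ t))
            rw [show (qc :: qt).length - 1 = qt.length from by simp, List.drop_left]
            congr 1
            apply ih
            · have := congrArg List.length hqet
              simp at this hs
              omega
            · exact noConf_of_infix (List.suffix_append (qc :: qt) t).isInfix hnc'
        · have hfq : (Q ++ [q]).find? (fun p => p.isPrefixOf (c :: rest)) = none := by
            rw [List.find?_append, hf]
            simp only [Option.none_or, List.find?_singleton]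
            rw [if_neg (by simpa [List.isPrefixOf_iff_prefix] using hqp)]
          rw [scanGo_cons, hf, scanGo_cons, hfq]
          have hnp : ¬ q.isPrefixOf (c :: scanGo Q rest) = true := by
            rw [List.isPrefixOf_iff_prefix]
            intro hpre
            cases q with
            | nil => exact hq rfl
            | cons y q' =>
              rw [List.cons_prefix_cons] at hpre
              obtain ⟨rfl, h'⟩ := hpre
              cases hq' : q' with
              | nil =>
                subst hq'
                exact hqp (List.cons_prefix_cons.mpr ⟨rfl, List.nil_prefix⟩)
              | cons z q'' =>
                have hstar : '*' ∉ q' := fun hz => hqs (List.mem_cons_of_mem _ hz)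
                have := starfree_prefix_scan Q rest q' (by simp [hq']) hstar h'
                exact hqp (List.cons_prefix_cons.mpr ⟨rfl, this⟩)
          rw [replP_cons, if_neg hnp]
          congr 1
          apply ih
          · simp at hs; omega
          · exact noConf_of_infix (List.suffix_cons c rest).isInfix hnc

theorem foldl_eq_scan (M : List (List Char)) :
    ∀ (P : List (List Char)), (∀ p ∈ P, p ≠ [] ∧ '*' ∉ p) → P.Pairwise (fun p q => CondB M p q = true) →
      ∀ s : List Char, NoConf M s →
        P.foldl (fun acc p => replP p (wrapP p) acc) s = scanGo P s := by
  intro P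
  induction P using List.reverseRecOn with
  | nil => intro _ _ s _; simp [scanGo_empty]
  | append_singleton Q q ih =>
    intro hP hpw s hnc
    obtain ⟨hpwQ, _, hcross⟩ := List.pairwise_append.mp hpw
    have hq := hP q (by simp)
    rw [List.foldl_append, List.foldl_cons, List.foldl_nil]
    rw [ih (fun p hp => hP p (by simp [hp])) hpwQ s hnc]
    exact step_lemma M Q q hq.1 hq.2 (fun p hp => hcross p hp q (by simp)) s.length s le_rfl hnc

-- bridging A's port to the 18-pattern foldl of replP
theorem chars_A (text : String) :
    (highlight_key_terms_py text).toList =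
      pvPatterns.foldl (fun acc p => replP p (wrapP p) acc) text.toList := by
  have h1 : (highlight_key_terms_py text).toList =
      pvKeyTerms.foldl (fun acc t =>
        PySem.Chars.replace (PySem.Chars.replace acc t.toList (wrapP t.toList))
          (pyCapitalize t).toList (wrapP (pyCapitalize t).toList)) text.toList := by
    unfold highlight_key_terms_py
    rw [← List.foldl_hom String.toList]
    intro x y
    simp [PySem.Str.toList_replace, wrapP]
  rw [h1]
  have h2 : pvKeyTerms.foldl (fun acc t =>
      PySem.Chars.replace (PySem.Chars.replace acc t.toList (wrapP t.toList))
        (pyCapitalize t).toList (wrapP (pyCapitalize t).toList)) text.toList =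
      pvPatterns.foldl (fun acc p => PySem.Chars.replace acc p (wrapP p)) text.toList := by
    simp only [pvPatterns, pvKeyTerms, List.flatMap_cons, List.flatMap_nil,
      List.foldl_cons, List.foldl_nil, List.append_nil, List.cons_append, List.nil_append]
  rw [h2]
  have hne : ∀ p ∈ pvPatterns, p ≠ [] := by decide
  exact PySem.List.foldl_congr_mem pvPatterns _ _ text.toList
    (fun acc p hp => replace_eq_replP p (wrapP p) acc (hne p hp))

-- ===== VERDICT (by name: the statement is the Claim_ definition above) =====
theorem highlight_key_terms_py_spec : Claim_equal_highlight_key_terms_py := by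
  intro text _hdom hpre
  unfold Spec_highlight_key_terms_py highlight_key_terms_py_alt
  have hnc : NoConf (pvConflicts.map String.toList) text.toList := by
    intro m hm
    simp only [List.mem_map] at hm
    obtain ⟨ms, hms, rfl⟩ := hm
    have := hpre ms hms
    rw [PySem.Str.isIn_eq] at this
    exact (PySem.Chars.isIn_eq_false_iff _ _).mp this
  have h := foldl_eq_scan (pvConflicts.map String.toList) pvPatterns (by decide) (by decide)
      text.toList hnc
  apply String.toList_inj.mp
  rw [String.toList_ofList, chars_A text, h]
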